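-- pv_equiv track=rewrite | github.com/Daerdemandt/Learning-bioinformatics | REAR/Solution.py | get_flips
-- ===== SOURCE A (Python) =====
-- def get_flips(segmentised_permutation):
-- 	perm = segmentised_permutation
-- 	good = []
-- 	better = []
-- 	length = len(segmentised_permutation)
-- 	def merges(seq1, seq2): # assumes uniqueness of elements
-- 		return abs(seq1[-1] - seq2[0]) == 1
-- 	def get_score(i,j):
-- 		start_merges = j + 1 != length and merges(perm[i][::-1], perm[j + 1])
-- 		end_merges = i != 0 and merges(perm[i - 1], perm[j][::-1])
-- 		return start_merges + end_merges
-- 	for i in range(length):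
-- 		for j in range(i, length):
-- 			score = get_score(i,j)
-- 			if 1 == score:
-- 				good.append((i,j))
-- 			if 2 == score:
-- 				better.append((i,j))
-- 	return good, better
-- ===== SOURCE B (Python) =====
-- def get_flips(segmentised_permutation):
--     perm = segmentised_permutation
--     n = len(perm)
--     good = []
--     better = []
--     if n <= 1:
--         return good, better
--     firsts = [s[0] for s in perm]
--     lasts = [s[-1] for s in perm]
--     by_first = {}
--     for k, v in enumerate(firsts):
--         by_first.setdefault(v, []).append(k)
--     by_last = {}
--     for k, v in enumerate(lasts):
--         by_last.setdefault(v, []).append(k)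
--     for i in range(n):
--         s_set = set()
--         for v in (firsts[i] - 1, firsts[i] + 1):
--             for k in by_first.get(v, []):
--                 if k - 1 >= i:
--                     s_set.add(k - 1)
--         e_set = set()
--         if i != 0:
--             for v in (lasts[i - 1] - 1, lasts[i - 1] + 1):
--                 for k in by_last.get(v, []):
--                     if k >= i:
--                         e_set.add(k)
--         for j in sorted(s_set ^ e_set):
--             good.append((i, j))
--         for j in sorted(s_set & e_set):
--             better.append((i, j))
--     return good, better
-- ===== Notes on version B (the rewrite author's own statement) =====
-- stated objective: faster
-- what changed: B replaces A's O(n^2) scan of all segment pairs (each rescoring via list reversals) with precomputed first/last-element arrays, hash maps from value to indices that enumerate only merge-candidate partners, and per-i sorted symmetric-difference/intersection of the two candidate sets.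
import Mathlib
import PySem

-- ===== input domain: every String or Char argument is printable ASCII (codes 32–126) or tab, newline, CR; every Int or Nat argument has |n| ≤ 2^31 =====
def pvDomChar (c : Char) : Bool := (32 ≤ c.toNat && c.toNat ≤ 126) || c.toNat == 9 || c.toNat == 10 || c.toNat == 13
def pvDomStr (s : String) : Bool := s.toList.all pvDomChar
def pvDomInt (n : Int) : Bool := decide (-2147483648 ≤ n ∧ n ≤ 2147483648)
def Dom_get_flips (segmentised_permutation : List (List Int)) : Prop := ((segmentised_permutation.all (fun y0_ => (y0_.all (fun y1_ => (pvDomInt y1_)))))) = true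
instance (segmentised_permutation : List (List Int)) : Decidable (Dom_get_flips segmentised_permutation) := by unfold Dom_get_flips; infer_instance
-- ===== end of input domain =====

-- B replaces A's O(n^2) all-pairs scan by hash indexes from first/last values to positions,
-- enumerating only merge-candidate partners per i (objective: faster; measured asymptotic).

-- ===== PORT A =====
-- indexing defaults via pyGet?/getD are exact on Pre_ (A raises IndexError outside it)
def pvMerges (seq1 seq2 : List Int) : Bool :=
  ((PySem.List.pyGet? seq1 (-1)).getD 0 - (PySem.List.pyGet? seq2 0).getD 0).natAbs == 1

def pvGetScore (perm : List (List Int)) (length i j : Int) : Nat :=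
  let startMerges := decide (j + 1 ≠ length) &&
    pvMerges ((PySem.List.slice? (PySem.List.pyGetD perm i []) none none (-1)).getD [])
             (PySem.List.pyGetD perm (j + 1) [])
  let endMerges := decide (i ≠ 0) &&
    pvMerges (PySem.List.pyGetD perm (i - 1) [])
             ((PySem.List.slice? (PySem.List.pyGetD perm j []) none none (-1)).getD [])
  (if startMerges then 1 else 0) + (if endMerges then 1 else 0)

def get_flips (segmentised_permutation : List (List Int)) : (List (Int × Int)) × (List (Int × Int)) :=
  let perm := segmentised_permutation
  let length : Int := PySem.List.len segmentised_permutation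
  (PySem.List.pyRange 0 length 1).foldl (fun acc i =>
    (PySem.List.pyRange i length 1).foldl (fun acc j =>
      let score := pvGetScore perm length i j
      (if 1 = score then acc.1 ++ [(i, j)] else acc.1,
       if 2 = score then acc.2 ++ [(i, j)] else acc.2)) acc) ([], [])

-- ===== PORT B =====
def pvFirst (s : List Int) : Int := (PySem.List.pyGet? s 0).getD 0
def pvLast (s : List Int) : Int := (PySem.List.pyGet? s (-1)).getD 0

-- by.setdefault(v, []).append(k) on (k, v) pairs
def pvIndexBy (vals : List Int) : PySem.Dict Int (List Int) :=
  (PySem.List.enumerate vals 0).foldl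
    (fun d kv => d.modify kv.2 [] (fun xs => xs ++ [kv.1])) PySem.Dict.empty

def get_flips_alt (segmentised_permutation : List (List Int)) : (List (Int × Int)) × (List (Int × Int)) :=
  let perm := segmentised_permutation
  let n : Int := PySem.List.len segmentised_permutation
  if n ≤ 1 then ([], []) else
  let firsts := perm.map pvFirst
  let lasts := perm.map pvLast
  let byFirst := pvIndexBy firsts
  let byLast := pvIndexBy lasts
  (PySem.List.pyRange 0 n 1).foldl (fun acc i =>
    let fi := PySem.List.pyGetD firsts i 0
    let sSet : PySem.Set Int := [fi - 1, fi + 1].foldl (fun s v =>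
      (byFirst.getD v []).foldl
        (fun s k => if i ≤ k - 1 then PySem.Set.add s (k - 1) else s) s) PySem.Set.empty
    let eSet : PySem.Set Int := if i ≠ 0 then
        let li := PySem.List.pyGetD lasts (i - 1) 0
        [li - 1, li + 1].foldl (fun s v =>
          (byLast.getD v []).foldl
            (fun s k => if i ≤ k then PySem.Set.add s k else s) s) PySem.Set.empty
      else PySem.Set.empty
    ((PySem.List.sorted (PySem.Set.symmDiff sSet eSet) (fun x => x) false).foldl
        (fun g j => g ++ [(i, j)]) acc.1,
     (PySem.List.sorted (PySem.Set.inter sSet eSet) (fun x => x) false).foldl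
        (fun b j => b ++ [(i, j)]) acc.2)) ([], [])

-- ===== PRECONDITION & SPEC =====
-- Pre_ excludes exactly the inputs where Python A raises IndexError: an empty segment
-- is indexed whenever there are at least two segments.
def Pre_get_flips (segmentised_permutation : List (List Int)) : Prop :=
  segmentised_permutation.length ≤ 1 ∨ ∀ s ∈ segmentised_permutation, s ≠ []
instance (segmentised_permutation : List (List Int)) : Decidable (Pre_get_flips segmentised_permutation) := by unfold Pre_get_flips; infer_instance
def pvWitness_get_flips : List (List Int) := [[1, 2], [5], [3, 4]]
def Spec_get_flips (segmentised_permutation : List (List Int)) (out : (List (Int × Int)) × (List (Int × Int))) : Prop := out = get_flips_alt segmentised_permutation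
instance (segmentised_permutation : List (List Int)) (out : (List (Int × Int)) × (List (Int × Int))) : Decidable (Spec_get_flips segmentised_permutation out) := by unfold Spec_get_flips; infer_instance

-- ===== CLAIM (what is proved, stated in full; the proofs are below) =====
def Claim_equal_get_flips : Prop := ∀ (segmentised_permutation : List (List Int)), Dom_get_flips segmentised_permutation → Pre_get_flips segmentised_permutation → Spec_get_flips segmentised_permutation (get_flips segmentised_permutation)

-- ===== LEMMAS AND PROOFS =====

-- canonical description of the result
def pvF (perm : List (List Int)) (k : Int) : Int := pvFirst (PySem.List.pyGetD perm k [])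
def pvL (perm : List (List Int)) (k : Int) : Int := pvLast (PySem.List.pyGetD perm k [])
def pvSb (perm : List (List Int)) (n i j : Int) : Bool :=
  decide (j + 1 ≠ n) && ((pvF perm i - pvF perm (j + 1)).natAbs == 1)
def pvEb (perm : List (List Int)) (_n i j : Int) : Bool :=
  decide (i ≠ 0) && ((pvL perm (i - 1) - pvL perm j).natAbs == 1)
def pvScore (perm : List (List Int)) (n i j : Int) : Nat :=
  (if pvSb perm n i j then 1 else 0) + (if pvEb perm n i j then 1 else 0)
def pvCanon (perm : List (List Int)) (n : Int) (c : Nat) : List (Int × Int) :=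
  (PySem.List.pyRange 0 n 1).flatMap (fun i =>
    ((PySem.List.pyRange i n 1).filter (fun j => decide (c = pvScore perm n i j))).map (fun j => (i, j)))

lemma foldl_pair_cond {α β : Type} (l : List α) (p q : α → Prop) [DecidablePred p] [DecidablePred q]
    (h : α → β) (acc : List β × List β) :
    l.foldl (fun acc j => (if p j then acc.1 ++ [h j] else acc.1,
                           if q j then acc.2 ++ [h j] else acc.2)) acc
    = (acc.1 ++ (l.filter (fun j => decide (p j))).map h,
       acc.2 ++ (l.filter (fun j => decide (q j))).map h) := by
  induction l generalizing acc with
  | nil => simp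
  | cons x t ih =>
    simp only [List.foldl_cons, ih, List.filter_cons]
    by_cases hp : p x <;> by_cases hq : q x <;> simp [hp, hq]

lemma foldl_pair_flat {α β : Type} (l : List α) (f g : α → List β) (acc : List β × List β) :
    l.foldl (fun acc i => (acc.1 ++ f i, acc.2 ++ g i)) acc
    = (acc.1 ++ l.flatMap f, acc.2 ++ l.flatMap g) := by
  induction l generalizing acc with
  | nil => simp
  | cons x t ih => simp [ih]

lemma pvMerges_rev_left (s t : List Int) :
    pvMerges ((PySem.List.slice? s none none (-1)).getD []) t
    = ((pvFirst s - pvFirst t).natAbs == 1) := by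
  simp [pvMerges, pvFirst, PySem.List.slice?_none_none_neg_one, PySem.List.pyGet?_neg_one,
    PySem.List.pyGet?_zero, List.getLast?_reverse, ← List.head?_eq_getElem?]

lemma pvMerges_rev_right (s t : List Int) :
    pvMerges s ((PySem.List.slice? t none none (-1)).getD [])
    = ((pvLast s - pvLast t).natAbs == 1) := by
  simp [pvMerges, pvLast, PySem.List.slice?_none_none_neg_one, PySem.List.pyGet?_neg_one,
    PySem.List.pyGet?_zero, ← List.head?_eq_getElem?, List.head?_reverse]

lemma score_eq (perm : List (List Int)) (n i j : Int) :
    pvGetScore perm n i j = pvScore perm n i j := by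
  simp [pvGetScore, pvScore, pvSb, pvEb, pvF, pvL, pvMerges_rev_left, pvMerges_rev_right]

lemma A_canon (perm : List (List Int)) :
    get_flips perm = (pvCanon perm perm.length 1, pvCanon perm perm.length 2) := by
  simp only [get_flips, PySem.List.len_eq]
  refine Eq.trans (PySem.List.foldl_congr_mem _ _
    (fun (acc : List (Int × Int) × List (Int × Int)) (i : Int) =>
      (acc.1 ++ ((PySem.List.pyRange i (perm.length : Int) 1).filter
          (fun j => decide (1 = pvScore perm (perm.length : Int) i j))).map (fun j => (i, j)),
       acc.2 ++ ((PySem.List.pyRange i (perm.length : Int) 1).filter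
          (fun j => decide (2 = pvScore perm (perm.length : Int) i j))).map (fun j => (i, j)))) _ ?_) ?_
  · intro acc i _
    refine Eq.trans (foldl_pair_cond _ (fun j => 1 = pvGetScore perm (perm.length : Int) i j)
      (fun j => 2 = pvGetScore perm (perm.length : Int) i j) (fun j => (i, j)) acc) ?_
    simp [score_eq]
  · rw [foldl_pair_flat]
    simp [pvCanon]

-- dict-index characterisation
lemma getD_groupFold (l : List (Int × Int)) (d : PySem.Dict Int (List Int)) (v : Int) :
    (l.foldl (fun d kv => d.modify kv.2 [] (fun xs => xs ++ [kv.1])) d).getD v []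
    = d.getD v [] ++ (l.filter (fun kv => kv.2 == v)).map (fun kv => kv.1) := by
  induction l generalizing d with
  | nil => simp
  | cons kv t ih =>
    simp only [List.foldl_cons, ih, List.filter_cons]
    rw [PySem.Dict.getD_modify]
    by_cases hv : v = kv.2
    · simp [hv, List.append_assoc]
    · have : ¬ (kv.2 == v) = true := by simpa using fun h => hv h.symm
      simp [hv, this]

lemma mem_getD_indexBy (vals : List Int) (v k : Int) :
    k ∈ (pvIndexBy vals).getD v []
    ↔ 0 ≤ k ∧ k < vals.length ∧ PySem.List.pyGetD vals k 0 = v := by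
  rw [pvIndexBy, getD_groupFold, PySem.List.enumerate_eq_map_pyRange vals 0]
  simp only [PySem.Dict.getD_empty, List.nil_append, List.filter_map, List.map_map,
    List.mem_map, List.mem_filter, Function.comp, PySem.List.mem_pyRange_one, PySem.List.len_eq]
  constructor
  · rintro ⟨j, ⟨⟨hj0, hjl⟩, hv⟩, rfl⟩
    exact ⟨hj0, hjl, by simpa using hv⟩
  · rintro ⟨h0, hl, hv⟩
    exact ⟨k, ⟨⟨h0, hl⟩, by simpa using hv⟩, rfl⟩

lemma mem_foldl_add_if (l : List Int) (guard : Int → Prop) [DecidablePred guard]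
    (g : Int → Int) (s0 : PySem.Set Int) (x : Int) :
    x ∈ l.foldl (fun s k => if guard k then PySem.Set.add s (g k) else s) s0
    ↔ x ∈ s0 ∨ ∃ k ∈ l, guard k ∧ x = g k := by
  induction l generalizing s0 with
  | nil => simp
  | cons a t ih =>
    simp only [List.foldl_cons, ih]
    by_cases h : guard a <;> (simp [h, PySem.Set.mem_add]; try tauto)

lemma nodup_foldl_add_if (l : List Int) (guard : Int → Prop) [DecidablePred guard]
    (g : Int → Int) (s0 : PySem.Set Int) (h : s0.Nodup) :
    (l.foldl (fun s k => if guard k then PySem.Set.add s (g k) else s) s0).Nodup := by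
  induction l generalizing s0 with
  | nil => exact h
  | cons a t ih =>
    simp only [List.foldl_cons]
    apply ih
    split
    · exact PySem.Set.nodup_add _ _ h
    · exact h

lemma pyGetD_firsts (perm : List (List Int)) (k : Int) :
    PySem.List.pyGetD (perm.map pvFirst) k 0 = pvF perm k := by
  have h0 : pvFirst ([] : List Int) = 0 := rfl
  rw [pvF, ← h0, PySem.List.pyGetD_map]

lemma pvLast_nil : pvLast ([] : List Int) = 0 := by
  simp [pvLast, PySem.List.pyGet?_neg_one]

lemma pyGetD_lasts (perm : List (List Int)) (k : Int) :
    PySem.List.pyGetD (perm.map pvLast) k 0 = pvL perm k := by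
  rw [pvL, ← pvLast_nil, PySem.List.pyGetD_map]

-- the candidate-set expressions of port B
def pvSSetExpr (perm : List (List Int)) (i : Int) : PySem.Set Int :=
  [PySem.List.pyGetD (perm.map pvFirst) i 0 - 1,
   PySem.List.pyGetD (perm.map pvFirst) i 0 + 1].foldl (fun s v =>
    ((pvIndexBy (perm.map pvFirst)).getD v []).foldl
      (fun s k => if i ≤ k - 1 then PySem.Set.add s (k - 1) else s) s) PySem.Set.empty

def pvESetExpr (perm : List (List Int)) (i : Int) : PySem.Set Int :=
  if i ≠ 0 then
    [PySem.List.pyGetD (perm.map pvLast) (i - 1) 0 - 1,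
     PySem.List.pyGetD (perm.map pvLast) (i - 1) 0 + 1].foldl (fun s v =>
      ((pvIndexBy (perm.map pvLast)).getD v []).foldl
        (fun s k => if i ≤ k then PySem.Set.add s k else s) s) PySem.Set.empty
  else PySem.Set.empty

-- membership in the per-i start-candidate set
lemma mem_sSet (perm : List (List Int)) (i : Int) (h0 : 0 ≤ i) (x : Int) :
    x ∈ pvSSetExpr perm i
    ↔ i ≤ x ∧ x + 1 < (perm.length : Int) ∧
      (pvF perm (x + 1) = pvF perm i - 1 ∨ pvF perm (x + 1) = pvF perm i + 1) := by
  unfold pvSSetExpr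
  simp only [List.foldl_cons, List.foldl_nil, pyGetD_firsts]
  rw [mem_foldl_add_if, mem_foldl_add_if]
  simp only [mem_getD_indexBy, pyGetD_firsts, List.length_map, PySem.Set.empty,
    List.not_mem_nil, false_or]
  constructor
  · rintro (⟨k, ⟨hk0, hkl, hv⟩, hik, rfl⟩ | ⟨k, ⟨hk0, hkl, hv⟩, hik, rfl⟩)
    · refine ⟨by omega, by omega, ?_⟩
      rw [show k - 1 + 1 = k by omega]
      omega
    · refine ⟨by omega, by omega, ?_⟩
      rw [show k - 1 + 1 = k by omega]
      omega
  · rintro ⟨hix, hxn, hv | hv⟩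
    · exact Or.inl ⟨x + 1, ⟨by omega, by omega, hv⟩, by omega, by omega⟩
    · exact Or.inr ⟨x + 1, ⟨by omega, by omega, hv⟩, by omega, by omega⟩

lemma mem_eSet (perm : List (List Int)) (i x : Int) (_hi : i ≠ 0) :
    x ∈ [PySem.List.pyGetD (perm.map pvLast) (i - 1) 0 - 1,
         PySem.List.pyGetD (perm.map pvLast) (i - 1) 0 + 1].foldl (fun s v =>
      ((pvIndexBy (perm.map pvLast)).getD v []).foldl
        (fun s k => if i ≤ k then PySem.Set.add s k else s) s) PySem.Set.empty
    ↔ i ≤ x ∧ 0 ≤ x ∧ x < (perm.length : Int) ∧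
      (pvL perm x = pvL perm (i - 1) - 1 ∨ pvL perm x = pvL perm (i - 1) + 1) := by
  simp only [List.foldl_cons, List.foldl_nil, pyGetD_lasts]
  rw [mem_foldl_add_if, mem_foldl_add_if]
  simp only [mem_getD_indexBy, pyGetD_lasts, List.length_map, PySem.Set.empty,
    List.not_mem_nil, false_or]
  constructor
  · rintro (⟨k, ⟨hk0, hkl, hv⟩, hik, rfl⟩ | ⟨k, ⟨hk0, hkl, hv⟩, hik, rfl⟩)
    · exact ⟨hik, hk0, hkl, Or.inl hv⟩
    · exact ⟨hik, hk0, hkl, Or.inr hv⟩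
  · rintro ⟨hix, hx0, hxn, hv | hv⟩
    · exact Or.inl ⟨x, ⟨hx0, hxn, hv⟩, hix, rfl⟩
    · exact Or.inr ⟨x, ⟨hx0, hxn, hv⟩, hix, rfl⟩

lemma nodup_sSet (perm : List (List Int)) (i : Int) : (pvSSetExpr perm i).Nodup := by
  unfold pvSSetExpr
  simp only [List.foldl_cons, List.foldl_nil]
  apply nodup_foldl_add_if
  apply nodup_foldl_add_if
  simp [PySem.Set.empty]

lemma nodup_eSet (perm : List (List Int)) (i : Int) :
    ([PySem.List.pyGetD (perm.map pvLast) (i - 1) 0 - 1,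
      PySem.List.pyGetD (perm.map pvLast) (i - 1) 0 + 1].foldl (fun s v =>
      ((pvIndexBy (perm.map pvLast)).getD v []).foldl
        (fun s k => if i ≤ k then PySem.Set.add s k else s) s) PySem.Set.empty).Nodup := by
  simp only [List.foldl_cons, List.foldl_nil]
  apply nodup_foldl_add_if
  apply nodup_foldl_add_if
  simp [PySem.Set.empty]

-- score characterisations on the range
lemma score_one_iff (perm : List (List Int)) (n i j : Int) :
    (1 = pvScore perm n i j) ↔
      ((pvSb perm n i j = true ∧ ¬ pvEb perm n i j = true) ∨
       (¬ pvSb perm n i j = true ∧ pvEb perm n i j = true)) := by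
  rcases hS : pvSb perm n i j <;> rcases hE : pvEb perm n i j <;> simp [pvScore, hS, hE]

lemma score_two_iff (perm : List (List Int)) (n i j : Int) :
    (2 = pvScore perm n i j) ↔ (pvSb perm n i j = true ∧ pvEb perm n i j = true) := by
  rcases hS : pvSb perm n i j <;> rcases hE : pvEb perm n i j <;> simp [pvScore, hS, hE]

lemma mem_eSetExpr (perm : List (List Int)) (i x : Int) :
    x ∈ pvESetExpr perm i ↔
      i ≠ 0 ∧ i ≤ x ∧ 0 ≤ x ∧ x < (perm.length : Int) ∧
        (pvL perm x = pvL perm (i - 1) - 1 ∨ pvL perm x = pvL perm (i - 1) + 1) := by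
  unfold pvESetExpr
  by_cases h0 : i ≠ 0
  · rw [if_pos h0, mem_eSet perm i x h0]
    tauto
  · rw [if_neg h0]
    simp only [PySem.Set.empty, List.not_mem_nil, false_iff]
    tauto

lemma nodup_eSetExpr (perm : List (List Int)) (i : Int) : (pvESetExpr perm i).Nodup := by
  unfold pvESetExpr
  split
  · exact nodup_eSet perm i
  · simp [PySem.Set.empty]

lemma sorted_sets_eq (perm : List (List Int)) (i : Int) (h0 : 0 ≤ i) (c : Nat)
    (hc : c = 1 ∨ c = 2) :
    PySem.List.sorted
      (if c = 1 then PySem.Set.symmDiff (pvSSetExpr perm i) (pvESetExpr perm i)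
       else PySem.Set.inter (pvSSetExpr perm i) (pvESetExpr perm i)) (fun x => x) false
    = (PySem.List.pyRange i (perm.length : Int) 1).filter
        (fun j => decide (c = pvScore perm (perm.length : Int) i j)) := by
  have hndS : (pvSSetExpr perm i).Nodup := nodup_sSet perm i
  have hndE := nodup_eSetExpr perm i
  apply PySem.List.sorted_eq_of_perm_of_pairwise_lt
  · rw [List.perm_ext_iff_of_nodup
      ((PySem.List.nodup_pyRange_one i (perm.length : Int)).filter _)
      (by rcases hc with rfl | rfl
          · simpa using PySem.Set.nodup_symmDiff _ _ hndS hndE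
          · simp only [if_neg (by omega : ¬ (2 : Nat) = 1)]
            exact PySem.Set.nodup_inter _ _ hndS)]
    intro x
    rw [List.mem_filter, PySem.List.mem_pyRange_one]
    have hS := mem_sSet perm i h0 x
    have hE := mem_eSetExpr perm i x
    rcases hc with rfl | rfl
    · rw [if_pos rfl, PySem.Set.mem_symmDiff, hS, hE]
      simp only [decide_eq_true_eq, score_one_iff, pvSb, pvEb, Bool.and_eq_true,
        beq_iff_eq, ne_eq]
      omega
    · rw [if_neg (by omega : ¬ (2 : Nat) = 1), PySem.Set.mem_inter, hS, hE]
      simp only [decide_eq_true_eq, score_two_iff, pvSb, pvEb, Bool.and_eq_true,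
        beq_iff_eq, ne_eq]
      omega
  · exact (PySem.List.pairwise_lt_pyRange_one i (perm.length : Int)).filter _

lemma B_canon (perm : List (List Int)) :
    get_flips_alt perm = (pvCanon perm perm.length 1, pvCanon perm perm.length 2) := by
  simp only [get_flips_alt, PySem.List.len_eq]
  by_cases hn : (perm.length : Int) ≤ 1
  · rw [if_pos hn]
    have hc : ∀ c : Nat, c = 1 ∨ c = 2 → pvCanon perm perm.length c = [] := by
      intro c hc
      unfold pvCanon
      rw [List.flatMap_eq_nil_iff]
      intro i hi
      rw [List.map_eq_nil_iff, List.filter_eq_nil_iff]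
      intro j hj
      rw [PySem.List.mem_pyRange_one] at hi hj
      have hSb : pvSb perm (perm.length : Int) i j = false := by
        simp only [pvSb, Bool.and_eq_false_iff, decide_eq_false_iff_not]
        left; omega
      have hEb : pvEb perm (perm.length : Int) i j = false := by
        simp only [pvEb, Bool.and_eq_false_iff, decide_eq_false_iff_not]
        left; omega
      simp [pvScore, hSb, hEb]
      omega
    rw [hc 1 (Or.inl rfl), hc 2 (Or.inr rfl)]
  · rw [if_neg hn]
    refine Eq.trans (PySem.List.foldl_congr_mem _ _
      (fun (acc : List (Int × Int) × List (Int × Int)) (i : Int) =>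
        (acc.1 ++ ((PySem.List.pyRange i (perm.length : Int) 1).filter
            (fun j => decide (1 = pvScore perm (perm.length : Int) i j))).map (fun j => (i, j)),
         acc.2 ++ ((PySem.List.pyRange i (perm.length : Int) 1).filter
            (fun j => decide (2 = pvScore perm (perm.length : Int) i j))).map (fun j => (i, j)))) _ ?_) ?_
    · intro acc i hi
      rw [PySem.List.mem_pyRange_one] at hi
      show ((PySem.List.sorted (PySem.Set.symmDiff (pvSSetExpr perm i) (pvESetExpr perm i))
              (fun x => x) false).foldl (fun g j => g ++ [(i, j)]) acc.1,
            (PySem.List.sorted (PySem.Set.inter (pvSSetExpr perm i) (pvESetExpr perm i))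
              (fun x => x) false).foldl (fun b j => b ++ [(i, j)]) acc.2) = _
      have h1 := sorted_sets_eq perm i hi.1 1 (Or.inl rfl)
      rw [if_pos rfl] at h1
      have h2 := sorted_sets_eq perm i hi.1 2 (Or.inr rfl)
      rw [if_neg (by omega : ¬ (2 : Nat) = 1)] at h2
      rw [h1, h2, PySem.List.foldl_append_singleton_eq_map, PySem.List.foldl_append_singleton_eq_map]
    · rw [foldl_pair_flat]
      simp [pvCanon]

-- ===== VERDICT (by name: the statement is the Claim_ definition above) =====
theorem get_flips_spec : Claim_equal_get_flips := by
  intro perm _ _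
  show get_flips perm = get_flips_alt perm
  rw [A_canon, B_canon]
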